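-- pv_equiv track=rewrite | github.com/aadeshnpn/revision | greedy.py | solution
-- ===== SOURCE A (Python) =====
-- def solution(A):
--     # write your code in Python 3.6
--     minval = 2000000001
--     for i in range(len(A)):
--         for j in range(len(A)):
--             absval = abs(A[i] + A[j])
--             if absval < minval:
--                 minval = absval
--     return minval
-- ===== SOURCE B (Python) =====
-- def solution(A):
--     # Sort, then two-pointer sweep: O(n log n) instead of A's O(n^2).
--     if not A:
--         return 2000000001
--     s = sorted(A)
--     lo, hi = 0, len(s) - 1
--     best = 2000000001
--     while lo <= hi:
--         v = s[lo] + s[hi]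
--         if abs(v) < best:
--             best = abs(v)
--         if v < 0:
--             lo += 1
--         elif v > 0:
--             hi -= 1
--         else:
--             return 0
--     return best
-- ===== Notes on version B (the rewrite author's own statement) =====
-- stated objective: faster
-- what changed: Replaces A's O(n^2) double loop over all index pairs by sorting the list and running a two-pointer sweep that examines O(n) pairs, proved to reach the same minimum absolute pairwise sum (same 2000000001 sentinel on empty input).
import Mathlib
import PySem

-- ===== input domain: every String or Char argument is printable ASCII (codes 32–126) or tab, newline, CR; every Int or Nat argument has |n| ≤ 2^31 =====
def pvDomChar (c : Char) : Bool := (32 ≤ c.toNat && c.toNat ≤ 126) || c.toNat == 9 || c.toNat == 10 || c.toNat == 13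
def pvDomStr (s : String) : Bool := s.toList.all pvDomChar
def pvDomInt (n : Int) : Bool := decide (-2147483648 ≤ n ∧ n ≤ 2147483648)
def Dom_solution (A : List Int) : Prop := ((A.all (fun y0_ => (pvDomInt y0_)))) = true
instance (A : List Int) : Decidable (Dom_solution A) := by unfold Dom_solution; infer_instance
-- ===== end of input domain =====

-- B replaces A's O(n^2) double loop by sort + two-pointer sweep (O(n log n)); same exact value.

-- ===== PORT A =====
def solution (A : List Int) : Int :=
  (PySem.List.pyRange 0 (A.length : Int) 1).foldl (fun minval i =>
    (PySem.List.pyRange 0 (A.length : Int) 1).foldl (fun minval j =>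
      let absval := |PySem.List.pyGetD A i 0 + PySem.List.pyGetD A j 0|
      if absval < minval then absval else minval) minval) 2000000001

-- ===== PORT B =====
-- the while-loop of Source B; Nat pointers, so Python's final `hi -= 1` from 0 (loop then exits)
-- is rendered as the `hi = 0` early exit with the same returned value
def tpLoop (s : List Int) (lo hi : Nat) (best : Int) : Int :=
  if h : lo ≤ hi then
    let v := s.getD lo 0 + s.getD hi 0
    let best' := if |v| < best then |v| else best
    if v < 0 then tpLoop s (lo + 1) hi best'
    else if 0 < v then (if hi = 0 then best' else tpLoop s lo (hi - 1) best')
    else 0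
  else best
termination_by hi + 1 - lo
decreasing_by all_goals omega

def solution_alt (A : List Int) : Int :=
  if A = [] then 2000000001
  else tpLoop (PySem.List.sorted A (fun x => x) false) 0 (A.length - 1) 2000000001

-- ===== PRECONDITION & SPEC =====
def Spec_solution (A : List Int) (out : Int) : Prop := out = solution_alt A
instance (A : List Int) (out : Int) : Decidable (Spec_solution A out) := by unfold Spec_solution; infer_instance

-- ===== CLAIM (what is proved, stated in full; the proofs are below) =====
def Claim_equal_solution : Prop := ∀ (A : List Int), Dom_solution A → Spec_solution A (solution A)

-- ===== LEMMAS AND PROOFS =====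

-- all pairwise absolute sums, as a list
def pairAbs (A : List Int) : List Int := A.flatMap (fun x => A.map (fun y => |x + y|))

lemma if_lt_eq_min (a m : Int) : (if a < m then a else m) = min a m := by
  rw [min_def]; split_ifs <;> omega

-- fold of min is min of initial value and the inf' of the list's elements
lemma foldl_min_eq_inf' (l : List Int) (c : Int) (hl : l ≠ []) :
    l.foldl (fun m z => min z m) c
      = min c (l.toFinset.inf' (by simp [List.toFinset_nonempty_iff, hl]) id) := by
  induction l generalizing c with
  | nil => exact absurd rfl hl
  | cons x xs ih =>
    by_cases hxs : xs = []
    · subst hxs; simp [min_comm]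
    · have h1 : xs.toFinset.Nonempty := by simpa [List.toFinset_nonempty_iff] using hxs
      have : (x :: xs).toFinset.inf' (by simp [List.toFinset_nonempty_iff, hl]) id
          = min x (xs.toFinset.inf' h1 id) := by
        simp [List.toFinset_cons, Finset.inf'_insert h1]
      rw [List.foldl_cons]
      show xs.foldl (fun m z => min z m) (min x c) = _
      rw [ih (min x c) hxs, this, min_comm x c, min_assoc]

lemma sorted_getD_mono (s : List Int) (hs : s.Pairwise (· ≤ ·)) (i j : Nat)
    (hij : i ≤ j) (hj : j < s.length) : s.getD i 0 ≤ s.getD j 0 := by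
  rcases lt_or_eq_of_le hij with hlt | rfl
  · rw [List.getD_eq_getElem s 0 (lt_of_le_of_lt hij hj), List.getD_eq_getElem s 0 hj]
    exact List.pairwise_iff_getElem.mp hs i j (lt_trans hlt hj) hj hlt
  · exact le_refl _

-- the pairwise-abs objective over an index square
def sqInf (s : List Int) (lo hi : Nat) (h : lo ≤ hi) : Int :=
  (Finset.Icc lo hi ×ˢ Finset.Icc lo hi).inf'
    ((Finset.nonempty_Icc.mpr h).product (Finset.nonempty_Icc.mpr h))
    (fun p => |s.getD p.1 0 + s.getD p.2 0|)

lemma sqInf_nonneg (s : List Int) (lo hi : Nat) (h : lo ≤ hi) : 0 ≤ sqInf s lo hi h := by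
  unfold sqInf
  exact Finset.le_inf' _ _ (fun p _ => abs_nonneg _)

lemma sqInf_le (s : List Int) (lo hi : Nat) (h : lo ≤ hi) (i j : Nat)
    (h1 : lo ≤ i) (h2 : i ≤ hi) (h3 : lo ≤ j) (h4 : j ≤ hi) :
    sqInf s lo hi h ≤ |s.getD i 0 + s.getD j 0| := by
  have hm : (i, j) ∈ Finset.Icc lo hi ×ˢ Finset.Icc lo hi :=
    Finset.mk_mem_product (Finset.mem_Icc.mpr ⟨h1, h2⟩) (Finset.mem_Icc.mpr ⟨h3, h4⟩)
  unfold sqInf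
  exact Finset.inf'_le_of_le (hb := hm) (h := le_refl _)

lemma sqInf_single (s : List Int) (lo : Nat) :
    sqInf s lo lo (le_refl lo) = |s.getD lo 0 + s.getD lo 0| := by
  simp [sqInf]

-- peeling the left pointer when s[lo] + s[hi] < 0
lemma sqInf_step_left (s : List Int) (hs : s.Pairwise (· ≤ ·)) (lo hi : Nat)
    (hlt : lo < hi) (hhi : hi < s.length) (hv : s.getD lo 0 + s.getD hi 0 < 0) :
    sqInf s lo hi (le_of_lt hlt)
      = min (|s.getD lo 0 + s.getD hi 0|) (sqInf s (lo + 1) hi hlt) := by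
  apply le_antisymm
  · exact le_min (sqInf_le s lo hi _ lo hi (le_refl _) (le_of_lt hlt) (le_of_lt hlt) (le_refl _))
      (Finset.le_inf' _ _ (fun p hp => by
        simp [Finset.mem_product, Finset.mem_Icc] at hp
        exact sqInf_le s lo hi _ p.1 p.2 (by omega) (by omega) (by omega) (by omega)))
  · apply Finset.le_inf'
    intro p hp
    simp [Finset.mem_product, Finset.mem_Icc] at hp
    by_cases hcase : lo + 1 ≤ p.1 ∧ lo + 1 ≤ p.2
    · exact le_trans (min_le_right _ _)
        (sqInf_le s (lo + 1) hi hlt p.1 p.2 hcase.1 hp.1.2 hcase.2 hp.2.2)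
    · -- one coordinate equals lo; the sum is ≤ s[lo]+s[hi] < 0, so its abs is ≥ |v|
      refine le_trans (min_le_left _ _) ?_
      have hmono1 : s.getD p.1 0 ≤ s.getD hi 0 := sorted_getD_mono s hs p.1 hi hp.1.2 hhi
      have hmono2 : s.getD p.2 0 ≤ s.getD hi 0 := sorted_getD_mono s hs p.2 hi hp.2.2 hhi
      have hlo1 : p.1 = lo ∨ p.2 = lo := by omega
      rcases hlo1 with h | h <;> rw [h] <;>
        [ (have hsum : s.getD lo 0 + s.getD p.2 0 < 0 := by omega);
          (have hsum : s.getD p.1 0 + s.getD lo 0 < 0 := by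
            have := sorted_getD_mono s hs p.1 hi hp.1.2 hhi; omega) ]
      · rw [abs_of_neg hv, abs_of_neg hsum]; omega
      · rw [abs_of_neg hv, abs_of_neg hsum]
        have := sorted_getD_mono s hs p.1 hi hp.1.2 hhi
        omega

-- peeling the right pointer when s[lo] + s[hi] > 0
lemma sqInf_step_right (s : List Int) (hs : s.Pairwise (· ≤ ·)) (lo hi : Nat)
    (hlt : lo < hi) (hhi : hi < s.length) (hv : 0 < s.getD lo 0 + s.getD hi 0) :
    sqInf s lo hi (le_of_lt hlt)
      = min (|s.getD lo 0 + s.getD hi 0|) (sqInf s lo (hi - 1) (by omega)) := by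
  apply le_antisymm
  · exact le_min (sqInf_le s lo hi _ lo hi (le_refl _) (le_of_lt hlt) (le_of_lt hlt) (le_refl _))
      (Finset.le_inf' _ _ (fun p hp => by
        simp [Finset.mem_product, Finset.mem_Icc] at hp
        exact sqInf_le s lo hi _ p.1 p.2 (by omega) (by omega) (by omega) (by omega)))
  · apply Finset.le_inf'
    intro p hp
    simp [Finset.mem_product, Finset.mem_Icc] at hp
    by_cases hcase : p.1 ≤ hi - 1 ∧ p.2 ≤ hi - 1
    · exact le_trans (min_le_right _ _)
        (sqInf_le s lo (hi - 1) (by omega) p.1 p.2 hp.1.1 hcase.1 hp.2.1 hcase.2)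
    · refine le_trans (min_le_left _ _) ?_
      have hmono1 : s.getD lo 0 ≤ s.getD p.1 0 :=
        sorted_getD_mono s hs lo p.1 hp.1.1 (by omega)
      have hmono2 : s.getD lo 0 ≤ s.getD p.2 0 :=
        sorted_getD_mono s hs lo p.2 hp.2.1 (by omega)
      have hhi1 : p.1 = hi ∨ p.2 = hi := by omega
      have hm1 : s.getD p.1 0 ≤ s.getD hi 0 := sorted_getD_mono s hs p.1 hi hp.1.2 hhi
      have hm2 : s.getD p.2 0 ≤ s.getD hi 0 := sorted_getD_mono s hs p.2 hi hp.2.2 hhi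
      rcases hhi1 with h | h <;> rw [h]
      · have hsum : 0 < s.getD hi 0 + s.getD p.2 0 := by omega
        rw [abs_of_pos hv, abs_of_pos hsum]; omega
      · have hsum : 0 < s.getD p.1 0 + s.getD hi 0 := by omega
        rw [abs_of_pos hv, abs_of_pos hsum]; omega

-- invariant of the two-pointer loop on a sorted list
lemma tpLoop_inv (s : List Int) (hs : s.Pairwise (· ≤ ·)) :
    ∀ (k lo hi : Nat), hi - lo = k → (hlohi : lo ≤ hi) → hi < s.length → ∀ best : Int, 0 ≤ best →
    tpLoop s lo hi best = min best (sqInf s lo hi hlohi) := by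
  intro k
  induction k with
  | zero =>
    intro lo hi hk hlohi hhi best hbest
    have heq : lo = hi := by omega
    subst heq
    rw [tpLoop, dif_pos hlohi]
    simp only []
    rcases lt_trichotomy (s.getD lo 0 + s.getD lo 0) 0 with hv | hv | hv
    · rw [if_pos hv, tpLoop, dif_neg (by omega : ¬ lo + 1 ≤ lo)]
      rw [if_lt_eq_min, sqInf_single, min_comm]
    · rw [if_neg (by omega), if_neg (by omega)]
      have h0 : |s.getD lo 0 + s.getD lo 0| = 0 := by rw [hv]; exact abs_zero
      rw [sqInf_single, h0, min_eq_right hbest]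
    · rw [if_neg (by omega), if_pos hv]
      rw [sqInf_single]
      by_cases hz : lo = 0
      · rw [if_pos hz, if_lt_eq_min, min_comm]
      · rw [if_neg hz, tpLoop, dif_neg (by omega : ¬ lo ≤ lo - 1)]
        rw [if_lt_eq_min, min_comm]
  | succ k ih =>
    intro lo hi hk hlohi hhi best hbest
    have hlt : lo < hi := by omega
    rw [tpLoop, dif_pos hlohi]
    simp only []
    have hbest' : (0 : Int) ≤ if |s.getD lo 0 + s.getD hi 0| < best then |s.getD lo 0 + s.getD hi 0| else best := by
      split_ifs
      · exact abs_nonneg _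
      · exact hbest
    rcases lt_trichotomy (s.getD lo 0 + s.getD hi 0) 0 with hv | hv | hv
    · rw [if_pos hv, ih (lo + 1) hi (by omega) hlt hhi _ hbest']
      rw [sqInf_step_left s hs lo hi hlt hhi hv, if_lt_eq_min]
      rw [min_comm (|s.getD lo 0 + s.getD hi 0|) best, min_assoc]
    · rw [if_neg (by omega), if_neg (by omega)]
      have hle : sqInf s lo hi hlohi ≤ 0 := by
        have := sqInf_le s lo hi hlohi lo hi (le_refl _) hlohi hlohi (le_refl _)
        rw [hv] at this; simpa using this
      have hge := sqInf_nonneg s lo hi hlohi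
      rw [le_antisymm hle hge, min_eq_right hbest]
    · rw [if_neg (by omega), if_pos hv, if_neg (by omega : ¬ hi = 0)]
      rw [ih lo (hi - 1) (by omega) (by omega) (by omega) _ hbest']
      rw [sqInf_step_right s hs lo hi hlt hhi hv, if_lt_eq_min]
      rw [min_comm (|s.getD lo 0 + s.getD hi 0|) best, min_assoc]

lemma solution_eq_fold (A : List Int) :
    solution A = (pairAbs A).foldl (fun m z => min z m) 2000000001 := by
  unfold solution pairAbs
  rw [PySem.List.foldl_pyRange_zero_pyGetD' A 0
    (fun acc x => (PySem.List.pyRange 0 (A.length : Int) 1).foldl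
      (fun m j => if |x + PySem.List.pyGetD A j 0| < m then |x + PySem.List.pyGetD A j 0| else m) acc)]
  rw [List.foldl_flatMap]
  have hfun : (fun (acc : Int) x => (PySem.List.pyRange 0 (A.length : Int) 1).foldl
      (fun m j => if |x + PySem.List.pyGetD A j 0| < m then |x + PySem.List.pyGetD A j 0| else m) acc)
      = (fun (acc : Int) x => (A.map (fun y => |x + y|)).foldl (fun m z => min z m) acc) := by
    funext acc x
    rw [PySem.List.foldl_pyRange_zero_pyGetD' A 0
      (fun m y => if |x + y| < m then |x + y| else m) acc]
    rw [List.foldl_map]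
    simp only [if_lt_eq_min]
  rw [hfun]

lemma pairAbs_ne_nil (A : List Int) (hA : A ≠ []) : pairAbs A ≠ [] := by
  obtain ⟨a, ha⟩ := List.exists_mem_of_ne_nil A hA
  exact List.ne_nil_of_mem (List.mem_flatMap.mpr ⟨a, ha, List.mem_map.mpr ⟨a, ha, rfl⟩⟩)

-- the inf' of all pairwise absolute sums of A equals the index-square inf' over sorted A
lemma inf_pairAbs_eq_sqInf (A : List Int) (hA : A ≠ []) :
    (pairAbs A).toFinset.inf'
        (by simp [List.toFinset_nonempty_iff, pairAbs_ne_nil A hA]) id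
      = sqInf (PySem.List.sorted A (fun x => x) false) 0 (A.length - 1) (Nat.zero_le _) := by
  have hlen : (PySem.List.sorted A (fun x => x) false).length = A.length :=
    PySem.List.length_sorted A (fun x => x) false
  have hn : 0 < A.length := List.length_pos_iff.mpr hA
  apply le_antisymm
  · unfold sqInf
    apply Finset.le_inf'
    intro p hp
    rw [Finset.mem_product, Finset.mem_Icc, Finset.mem_Icc] at hp
    have hp1 : p.1 < (PySem.List.sorted A (fun x => x) false).length := by omega
    have hp2 : p.2 < (PySem.List.sorted A (fun x => x) false).length := by omega
    have hmem : |(PySem.List.sorted A (fun x => x) false).getD p.1 0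
        + (PySem.List.sorted A (fun x => x) false).getD p.2 0| ∈ (pairAbs A).toFinset := by
      rw [List.mem_toFinset]
      apply List.mem_flatMap.mpr
      refine ⟨(PySem.List.sorted A (fun x => x) false).getD p.1 0, ?_, ?_⟩
      · rw [List.getD_eq_getElem _ 0 hp1]
        exact (PySem.List.mem_sorted _ _ _ _).mp (List.getElem_mem hp1)
      · apply List.mem_map.mpr
        refine ⟨(PySem.List.sorted A (fun x => x) false).getD p.2 0, ?_, rfl⟩
        rw [List.getD_eq_getElem _ 0 hp2]
        exact (PySem.List.mem_sorted _ _ _ _).mp (List.getElem_mem hp2)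
    exact Finset.inf'_le_of_le (hb := hmem) (h := le_refl _)
  · apply Finset.le_inf'
    intro z hz
    rw [List.mem_toFinset] at hz
    obtain ⟨x, hx, hz⟩ := List.mem_flatMap.mp hz
    obtain ⟨y, hy, rfl⟩ := List.mem_map.mp hz
    have hx' : x ∈ PySem.List.sorted A (fun x => x) false := (PySem.List.mem_sorted _ _ _ _).mpr hx
    have hy' : y ∈ PySem.List.sorted A (fun x => x) false := (PySem.List.mem_sorted _ _ _ _).mpr hy
    obtain ⟨i, hi, hxi⟩ := List.mem_iff_getElem.mp hx'
    obtain ⟨j, hj, hyj⟩ := List.mem_iff_getElem.mp hy'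
    have := sqInf_le (PySem.List.sorted A (fun x => x) false) 0 (A.length - 1)
      (Nat.zero_le _) i j (Nat.zero_le _) (by omega) (Nat.zero_le _) (by omega)
    rw [List.getD_eq_getElem _ 0 hi, List.getD_eq_getElem _ 0 hj, hxi, hyj] at this
    exact this

theorem solution_spec : Claim_equal_solution := by
  intro A _
  unfold Spec_solution solution_alt
  by_cases hA : A = []
  · subst hA
    rfl
  · rw [if_neg hA]
    have hlen : (PySem.List.sorted A (fun x => x) false).length = A.length :=
      PySem.List.length_sorted A (fun x => x) false
    have hn : 0 < A.length := List.length_pos_iff.mpr hA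
    have hs : (PySem.List.sorted A (fun x => x) false).Pairwise (· ≤ ·) := by
      have := PySem.List.sorted_pairwise A (fun x => x) (κ := Int)
      simpa using this
    rw [solution_eq_fold, foldl_min_eq_inf' (pairAbs A) 2000000001 (pairAbs_ne_nil A hA)]
    rw [tpLoop_inv (PySem.List.sorted A (fun x => x) false) hs (A.length - 1) 0 (A.length - 1)
      rfl (Nat.zero_le _) (by omega) 2000000001 (by norm_num)]
    rw [inf_pairAbs_eq_sqInf A hA]
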